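-- pv_equiv track=rewrite | github.com/alirezaopmc/UT-PTCC | e2/03 Broken Triangles/tcg.py | solveOut
-- ===== SOURCE A (Python) =====
-- def solveOut(inputs):
--     (n, m, c) = inputs
--
--     res = ''
--     for i in range(n):
--         res += ' ' * (n - i - 1)
--         for j in range(2*i+1):
--             res += c if j != m-1 else ' '
--         res += '\n'
--
--     return res
-- ===== SOURCE B (Python) =====
-- def solveOut(inputs):
--     (n, m, c) = inputs
--     rows = []
--     for i in range(n):
--         count = 2 * i + 1
--         if 1 <= m <= count:
--             row = c * (m - 1) + ' ' + c * (count - m)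
--         else:
--             row = c * count
--         rows.append(' ' * (n - i - 1) + row + '\n')
--     return ''.join(rows)
-- ===== Notes on version B (the rewrite author's own statement) =====
-- stated objective: simpler
-- what changed: Replaces A's inner per-character loop and running string concatenation with direct string multiplication (two runs of c around one space when m is in range) and a final ''.join of the rows.
import Mathlib
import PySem

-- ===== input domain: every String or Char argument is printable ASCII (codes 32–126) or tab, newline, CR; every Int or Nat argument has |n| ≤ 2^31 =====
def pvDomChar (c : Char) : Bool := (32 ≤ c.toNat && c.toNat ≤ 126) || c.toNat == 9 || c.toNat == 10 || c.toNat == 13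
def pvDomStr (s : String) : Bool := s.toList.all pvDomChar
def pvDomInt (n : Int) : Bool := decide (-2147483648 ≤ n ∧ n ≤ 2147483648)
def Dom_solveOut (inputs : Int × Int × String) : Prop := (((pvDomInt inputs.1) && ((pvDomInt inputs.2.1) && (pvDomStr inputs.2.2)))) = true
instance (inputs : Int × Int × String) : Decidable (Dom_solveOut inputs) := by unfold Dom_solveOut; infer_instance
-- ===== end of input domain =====

-- B builds each row whole by string multiplication over two runs of c around one space and joins
-- the rows, instead of A's inner per-character loop — objective: simpler.
-- ===== PORT A =====
-- A builds res run by run: per row, leading spaces, then 2i+1 items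
-- (c, or ' ' at position m-1), then '\n'. Ported over List Char; String.ofList at the end.
def solveOut (inputs : Int × Int × String) : String :=
  let n := inputs.1
  let m := inputs.2.1
  let c := inputs.2.2
  let res : List Char :=
    (PySem.List.pyRange 0 n 1).foldl (fun res i =>
      let res := res ++ PySem.List.pyRepeat [' '] (n - i - 1)
      let res := (PySem.List.pyRange 0 (2*i+1) 1).foldl (fun res j =>
        res ++ (if j ≠ m - 1 then c.toList else [' '])) res
      res ++ ['\n']) []
  String.ofList res

-- ===== PORT B =====
-- B from Source B: build each row by string multiplication, ''.join the rows (= flatten).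
def solveOut_alt (inputs : Int × Int × String) : String :=
  let n := inputs.1
  let m := inputs.2.1
  let c := inputs.2.2
  let rows : List (List Char) :=
    (PySem.List.pyRange 0 n 1).map (fun i =>
      let count := 2*i + 1
      let row := if 1 ≤ m ∧ m ≤ count then
          PySem.List.pyRepeat c.toList (m - 1) ++ [' '] ++ PySem.List.pyRepeat c.toList (count - m)
        else
          PySem.List.pyRepeat c.toList count
      PySem.List.pyRepeat [' '] (n - i - 1) ++ row ++ ['\n'])
  String.ofList rows.flatten

-- ===== PRECONDITION & SPEC =====
def Spec_solveOut (inputs : Int × Int × String) (out : String) : Prop := out = solveOut_alt inputs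
instance (inputs : Int × Int × String) (out : String) : Decidable (Spec_solveOut inputs out) := by unfold Spec_solveOut; infer_instance

-- ===== CLAIM (what is proved, stated in full; the proofs are below) =====
def Claim_equal_solveOut : Prop := ∀ (inputs : Int × Int × String), Dom_solveOut inputs → Spec_solveOut inputs (solveOut inputs)

-- ===== LEMMAS AND PROOFS =====

-- flatMap of a constant over a range of k integers is k copies of cs
theorem flatMap_const_range_nat (cs : List Char) (a : Int) (k : Nat) :
    (PySem.List.pyRange a (a + k) 1).flatMap (fun _ => cs) = (List.replicate k cs).flatten := by
  induction k with
  | zero => simp [PySem.List.pyRange_one_eq_nil le_rfl]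
  | succ k ih =>
    have h1 : a + ((k:Int) + 1) = (a + k) + 1 := by ring
    have h2 : a ≤ a + (k:Int) := by omega
    push_cast
    rw [h1, PySem.List.pyRange_one_succ_right h2, List.flatMap_append, ih, List.replicate_succ']
    simp

-- flatMap of a constant over a range is pyRepeat
theorem flatMap_const_pyRange (cs : List Char) (a b : Int) :
    (PySem.List.pyRange a b 1).flatMap (fun _ => cs) = PySem.List.pyRepeat cs (b - a) := by
  rcases le_or_gt b a with h | h
  · rw [PySem.List.pyRange_one_eq_nil h]
    have : (b - a).toNat = 0 := by omega
    simp [PySem.List.pyRepeat, this]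
  · have hb : b = a + ((b - a).toNat : Int) := by omega
    rw [hb, flatMap_const_range_nat]
    have : (a + ((b - a).toNat : Int) - a).toNat = (b - a).toNat := by omega
    rw [PySem.List.pyRepeat, this]

-- a flatMap whose test never fires is a constant flatMap
theorem flatMap_if_of_ne (cs : List Char) (v : Int) (l : List Int) (h : ∀ j ∈ l, j ≠ v) :
    l.flatMap (fun j => if j ≠ v then cs else [' ']) = l.flatMap (fun _ => cs) := by
  induction l with
  | nil => rfl
  | cons x xs ih =>
    have hx : x ≠ v := h x (by simp)
    simp only [List.flatMap_cons, if_pos hx, ih (fun j hj => h j (by simp [hj]))]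

-- inner loop of A as two runs of c around one space (or a single run when m-1 is out of range)
theorem inner_eq (cs : List Char) (m k : Int) :
    (PySem.List.pyRange 0 k 1).flatMap (fun j => if j ≠ m - 1 then cs else [' '])
      = if 1 ≤ m ∧ m ≤ k then
          PySem.List.pyRepeat cs (m - 1) ++ [' '] ++ PySem.List.pyRepeat cs (k - m)
        else PySem.List.pyRepeat cs k := by
  by_cases hm : 1 ≤ m ∧ m ≤ k
  · rw [if_pos hm]
    have hsplit : PySem.List.pyRange 0 k 1
        = PySem.List.pyRange 0 (m-1) 1 ++ (PySem.List.pyRange (m-1) m 1 ++ PySem.List.pyRange m k 1) := by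
      rw [← PySem.List.pyRange_one_append (m-1) m k (by omega) (by omega),
        ← PySem.List.pyRange_one_append 0 (m-1) k (by omega) (by omega)]
    have hmid : PySem.List.pyRange (m-1) m 1 = [m-1] := by
      have := PySem.List.pyRange_one_singleton (m-1)
      rwa [show m - 1 + 1 = m by ring] at this
    have h1 : (PySem.List.pyRange 0 (m-1) 1).flatMap (fun j => if j ≠ m - 1 then cs else [' '])
        = PySem.List.pyRepeat cs (m - 1) := by
      rw [flatMap_if_of_ne cs (m-1) _ (fun j hj => by
          rw [PySem.List.mem_pyRange_one] at hj; omega),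
        flatMap_const_pyRange]
      norm_num
    have h3 : (PySem.List.pyRange m k 1).flatMap (fun j => if j ≠ m - 1 then cs else [' '])
        = PySem.List.pyRepeat cs (k - m) := by
      rw [flatMap_if_of_ne cs (m-1) _ (fun j hj => by
          rw [PySem.List.mem_pyRange_one] at hj; omega),
        flatMap_const_pyRange]
    rw [hsplit, List.flatMap_append, List.flatMap_append, h1, h3, hmid]
    simp
  · rw [if_neg hm,
      flatMap_if_of_ne cs (m-1) _ (fun j hj => by
        rw [PySem.List.mem_pyRange_one] at hj; omega),
      flatMap_const_pyRange]
    norm_num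

-- ===== VERDICT (by name: the statement is the Claim_ definition above) =====
theorem solveOut_spec : Claim_equal_solveOut := by
  intro inputs _
  obtain ⟨n, m, c⟩ := inputs
  unfold Spec_solveOut solveOut solveOut_alt
  simp only []
  congr 1
  rw [PySem.List.foldl_congr_mem _ _
    (fun res i => res ++ (PySem.List.pyRepeat [' '] (n - i - 1) ++
      (if 1 ≤ m ∧ m ≤ 2*i+1 then
          PySem.List.pyRepeat c.toList (m - 1) ++ [' '] ++ PySem.List.pyRepeat c.toList (2*i+1 - m)
        else PySem.List.pyRepeat c.toList (2*i+1)) ++ ['\n'])) []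
    (by
      intro acc i _
      rw [PySem.List.foldl_append_eq_flatMap, inner_eq]
      simp [List.append_assoc]),
    PySem.List.foldl_append_eq_flatMap, List.flatMap_def]
  simp
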